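-- pv_equiv track=rewrite | github.com/fac33/py_intro_exercise | week7-8/week7/hw26/multiples_of_n.py | multiples_of
-- ===== SOURCE A (Python) =====
-- def multiples_of(n,l):
--     ind = 0 #position of list
--     num_a = 0 #numbers of replaced a.
--     for i in l:
--         if i%n:
--             l[ind] = 'a'
--             num_a+=1
--         ind+=1
--     for j in range(num_a):
--         l.remove('a')
--     return l
-- ===== SOURCE B (Python) =====
-- def multiples_of(n, l):
--     # In-place two-pointer compaction: one pass, one truncation.
--     w = 0
--     for x in l:
--         if x % n == 0:
--             l[w] = x
--             w += 1
--     del l[w:]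
--     return l
-- ===== Notes on version B (the rewrite author's own statement) =====
-- stated objective: faster
-- what changed: Replaces A's sentinel-marking pass followed by repeated list.remove('a') scans with a single in-place write-pointer compaction and one tail truncation.
-- outside the precondition, e.g. on multiples_of(0, []): A returns [], B returns []
import Mathlib
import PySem

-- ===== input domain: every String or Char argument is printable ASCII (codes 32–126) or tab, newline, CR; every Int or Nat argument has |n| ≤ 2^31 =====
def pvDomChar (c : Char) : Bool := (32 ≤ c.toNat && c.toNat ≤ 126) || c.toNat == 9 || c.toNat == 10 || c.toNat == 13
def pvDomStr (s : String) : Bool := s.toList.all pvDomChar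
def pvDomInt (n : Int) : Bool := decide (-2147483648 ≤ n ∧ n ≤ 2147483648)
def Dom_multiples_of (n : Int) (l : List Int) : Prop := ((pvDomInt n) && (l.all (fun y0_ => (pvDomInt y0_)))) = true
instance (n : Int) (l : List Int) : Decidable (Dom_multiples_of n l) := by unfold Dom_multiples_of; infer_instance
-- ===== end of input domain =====

-- B replaces A's sentinel-marking pass followed by repeated list.remove scans with a single
-- in-place write-pointer compaction pass and one tail truncation (faster). In Python both A
-- and B mutate l in place and return the same list object; the theorems are about the
-- returned value.

-- ===== PORT A =====
-- Python's l is mutated to hold ints and the sentinel string 'a'; that heterogeneous list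
-- is ported as List (Option Int): `some i` is the int i, `none` is the sentinel 'a'.
def multiples_of (n : Int) (l : List Int) : List Int :=
  -- first loop: overwrite every non-multiple (if i%n:) with the sentinel, counting them
  let st := l.foldl
    (fun (st : List (Option Int) × Nat × Nat) i =>
      if PySem.Int.mod i n ≠ 0 then (st.1.set st.2.1 none, st.2.1 + 1, st.2.2 + 1)
      else (st.1, st.2.1 + 1, st.2.2))
    (l.map some, 0, 0)
  -- second loop: for j in range(num_a): l.remove('a')
  -- (ValueError is impossible: num_a sentinels are present, so getD's fallback is never taken)
  let m := (List.range st.2.2).foldl (fun m _ => (PySem.List.remove? m none).getD m) st.1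
  -- Python's l now holds only ints; read them back (getD 0 is never taken on a sentinel)
  m.map (fun o => o.getD 0)

-- ===== PORT B =====
def multiples_of_alt (n : Int) (l : List Int) : List Int :=
  -- write-pointer compaction: l[w] = x; w += 1 for each multiple x
  let st := l.foldl
    (fun (st : List Int × Nat) x =>
      if PySem.Int.mod x n = 0 then (st.1.set st.2 x, st.2 + 1) else st)
    (l, 0)
  -- del l[w:]
  st.1.take st.2

-- ===== PRECONDITION & SPEC =====
-- Pre_ excludes exactly n = 0, on which Python's `i % n` raises ZeroDivisionError (in A and
-- in B) whenever l is nonempty; the sole returning excluded input is (0, []), where the loop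
-- body never runs and both A and B return [].
def Pre_multiples_of (n : Int) (l : List Int) : Prop := n ≠ 0
instance (n : Int) (l : List Int) : Decidable (Pre_multiples_of n l) := by unfold Pre_multiples_of; infer_instance
def pvWitness_multiples_of : Int × List Int := (3, [3, 4, 9, 0, -6, 7])

def Spec_multiples_of (n : Int) (l : List Int) (out : List Int) : Prop := out = multiples_of_alt n l
instance (n : Int) (l : List Int) (out : List Int) : Decidable (Spec_multiples_of n l out) := by unfold Spec_multiples_of; infer_instance

-- ===== CLAIM (what is proved, stated in full; the proofs are below) =====
def Claim_equal_multiples_of : Prop := ∀ (n : Int) (l : List Int), Dom_multiples_of n l → Pre_multiples_of n l → Spec_multiples_of n l (multiples_of n l)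

-- ===== LEMMAS AND PROOFS =====

-- Setting the cell right after a prefix K.
theorem pv_set_append_length {α : Type} (K : List α) (b v : α) (t : List α) :
    (K ++ b :: t).set K.length v = K ++ v :: t := by
  induction K with
  | nil => rfl
  | cons a K ih => simp [ih]

-- A's marking loop: with the processed prefix K already marked, it marks the rest in place
-- and counts the sentinels it wrote.
theorem pv_mark_loop (n : Int) :
    ∀ (rest : List Int) (K : List (Option Int)) (a : Nat),
    rest.foldl
      (fun (st : List (Option Int) × Nat × Nat) i =>
        if PySem.Int.mod i n ≠ 0 then (st.1.set st.2.1 none, st.2.1 + 1, st.2.2 + 1)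
        else (st.1, st.2.1 + 1, st.2.2))
      (K ++ rest.map some, K.length, a)
    = (K ++ rest.map (fun i => if PySem.Int.mod i n ≠ 0 then none else some i),
       K.length + rest.length,
       a + rest.countP (fun i => decide (PySem.Int.mod i n ≠ 0))) := by
  intro rest
  induction rest with
  | nil => intro K a; simp
  | cons i rest ih =>
    intro K a
    simp only [List.map_cons, List.foldl_cons, List.countP_cons]
    by_cases hi : PySem.Int.mod i n = 0
    · have hrec := ih (K ++ [some i]) a
      simp only [List.append_assoc, List.singleton_append, List.length_append,
        List.length_cons, List.length_nil] at hrec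
      simp only [hi, ne_eq, not_true_eq_false, if_false, decide_false]
      rw [hrec]
      simp only [List.map_cons, hi, ne_eq, not_true_eq_false, if_false, List.length_cons]
      simp only [Prod.mk.injEq]
      refine ⟨trivial, by omega, by simp [Nat.add_assoc, Nat.add_comm, Nat.add_left_comm]⟩
    · have hrec := ih (K ++ [none]) (a + 1)
      simp only [List.append_assoc, List.singleton_append, List.length_append,
        List.length_cons, List.length_nil] at hrec
      simp only [hi, ne_eq, not_false_eq_true, if_true, decide_true]
      rw [pv_set_append_length, hrec]
      simp only [List.map_cons, hi, ne_eq, not_false_eq_true, if_true, List.length_cons]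
      simp only [Prod.mk.injEq]
      refine ⟨trivial, by omega, by simp [Nat.add_assoc, Nat.add_comm, Nat.add_left_comm]⟩

-- `for j in range(k): m = g m` is k-fold iteration of g.
theorem pv_foldl_range_const {α : Type} (g : α → α) :
    ∀ (k : Nat) (m : α), (List.range k).foldl (fun s _ => g s) m = g^[k] m := by
  intro k
  induction k with
  | zero => intro m; simp
  | succ k ih =>
    intro m
    rw [List.range_succ, List.foldl_append, ih, Function.iterate_succ_apply']
    rfl

-- A remove step keeps a non-sentinel head, as long as a sentinel remains to be removed.
theorem pv_rm_skip (n : Int) :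
    ∀ (c : Nat) (x : Int) (t : List (Option Int)), c ≤ t.count none →
    (fun m => ((PySem.List.remove? m none).getD m))^[c] (some x :: t)
      = some x :: (fun m => ((PySem.List.remove? m none).getD m))^[c] t := by
  intro c
  induction c with
  | zero => intro x t _; rfl
  | succ c ih =>
    intro x t hc
    have hmem : (none : Option Int) ∈ t := by
      by_contra h
      simp [List.count_eq_zero_of_not_mem h] at hc
    have hrem : PySem.List.remove? t none = some (t.erase none) :=
      PySem.List.remove?_eq_some_erase t none hmem
    have hcount : (t.erase none).count none = t.count none - 1 :=
      List.count_erase_self (a := none) (l := t)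
    rw [Function.iterate_succ_apply, Function.iterate_succ_apply]
    have hstep : (PySem.List.remove? (some x :: t) none).getD (some x :: t)
        = some x :: t.erase none := by
      rw [PySem.List.remove?_cons_of_ne t (by simp), hrem]; rfl
    rw [hstep]
    simp only [hrem, Option.getD_some]
    exact ih x (t.erase none) (by omega)

-- Removing the sentinel exactly (count of sentinels) times leaves the unmarked cells.
theorem pv_rm_all (n : Int) :
    ∀ (m : List (Option Int)),
    (fun m => ((PySem.List.remove? m none).getD m))^[m.count none] m
      = m.filter (fun o => o.isSome) := by
  intro m
  induction m with
  | nil => rfl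
  | cons o t ih =>
    cases o with
    | none =>
      rw [List.count_cons_self, Function.iterate_succ_apply]
      have hstep : (PySem.List.remove? (none :: t) none).getD (none :: t) = t := by
        rw [PySem.List.remove?_cons_self]; rfl
      rw [hstep, ih]
      simp
    | some x =>
      rw [List.count_cons_of_ne (by simp)]
      rw [pv_rm_skip n _ x t (le_refl _), ih]
      simp

-- The number of sentinels A wrote into the marked list.
theorem pv_count_none (n : Int) (l : List Int) :
    (l.map (fun i => if PySem.Int.mod i n ≠ 0 then none else some i)).count (none : Option Int)
      = l.countP (fun i => decide (PySem.Int.mod i n ≠ 0)) := by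
  induction l with
  | nil => rfl
  | cons i l ih =>
    simp only [List.map_cons, List.count_cons, List.countP_cons, ih]
    by_cases hi : PySem.Int.mod i n = 0
    · rw [if_neg (by simpa using hi)]
      simp [hi]
    · rw [if_pos hi]
      simp [hi]

-- Reading the surviving cells back as ints gives the filtered list.
theorem pv_extract (n : Int) (l : List Int) :
    (((l.map (fun i => if PySem.Int.mod i n ≠ 0 then none else some i)).filter
        (fun o => o.isSome)).map (fun o => o.getD 0))
      = l.filter (fun x => decide (PySem.Int.mod x n = 0)) := by
  induction l with
  | nil => rfl
  | cons i l ih =>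
    simp only [List.map_cons]
    by_cases hi : PySem.Int.mod i n = 0
    · rw [if_neg (by simpa using hi), List.filter_cons_of_pos (by simp),
          List.map_cons, List.filter_cons_of_pos (by simp [hi])]
      simp only [Option.getD_some, ih]
    · rw [if_pos hi, List.filter_cons_of_neg (by simp),
          List.filter_cons_of_neg (by simp [hi])]
      exact ih

theorem pv_A_eq (n : Int) (l : List Int) :
    multiples_of n l = l.filter (fun x => decide (PySem.Int.mod x n = 0)) := by
  have hm := pv_mark_loop n l [] 0
  simp only [List.nil_append, List.length_nil, Nat.zero_add] at hm
  simp only [multiples_of, hm]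
  rw [pv_foldl_range_const, ← pv_count_none n l, pv_rm_all n, pv_extract]

-- B's compaction loop: starting from K ++ junk with write pointer |K|, enough junk cells
-- remaining, the first |K| + (kept count) cells end up K ++ filter; the take reads them off.
theorem pv_alt_loop (n : Int) :
    ∀ (rest K junk : List Int),
      rest.countP (fun x => decide (PySem.Int.mod x n = 0)) ≤ junk.length →
    (let r := rest.foldl
        (fun (st : List Int × Nat) x =>
          if PySem.Int.mod x n = 0 then (st.1.set st.2 x, st.2 + 1) else st)
        (K ++ junk, K.length)
     r.1.take r.2) = K ++ rest.filter (fun x => decide (PySem.Int.mod x n = 0)) := by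
  intro rest
  induction rest with
  | nil =>
    intro K junk _
    simp
  | cons x rest ih =>
    intro K junk hcnt
    simp only [List.foldl_cons, List.filter_cons, List.countP_cons] at *
    by_cases hx : PySem.Int.mod x n = 0
    · simp only [hx, decide_true, if_pos] at *
      cases junk with
      | nil => simp at hcnt
      | cons j junk =>
        have hset : (K ++ j :: junk).set K.length x = (K ++ [x]) ++ junk :=
          by rw [pv_set_append_length]; simp
        have hrec := ih (K ++ [x]) junk (by simp at hcnt ⊢; omega)
        simp only [List.length_append, List.length_cons, List.length_nil] at hrec
        simpa [hset] using hrec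
    · simp only [hx, decide_false] at *
      have hrec := ih K junk (by omega)
      simpa using hrec

theorem pv_B_eq (n : Int) (l : List Int) :
    multiples_of_alt n l = l.filter (fun x => decide (PySem.Int.mod x n = 0)) := by
  have h := pv_alt_loop n l [] l List.countP_le_length
  simpa [multiples_of_alt] using h

-- ===== VERDICT (by name: the statement is the Claim_ definition above) =====
theorem multiples_of_spec : Claim_equal_multiples_of := by
  intro n l _ _
  unfold Spec_multiples_of
  rw [pv_A_eq, pv_B_eq]
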